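-- pv_equiv track=rewrite | github.com/Jinyoung0718/CodingTest | 프로그래머스/0/181855. 문자열 묶기/문자열 묶기.py | solution
-- ===== SOURCE A (Python) =====
-- def solution(strArr):
--
--     result = 0
--     dic = {}
--
--     for s in strArr:
--         if len(s) in dic.keys():
--             dic[len(s)] += 1
--         else:
--             dic[len(s)] = 1
--     result = max(dic.values())
--
--     return result
-- ===== SOURCE B (Python) =====
-- def solution(strArr):
--     # sort the lengths, then scan consecutive runs; max([]) raises ValueError like A's max on an empty dict
--     lengths = sorted(len(s) for s in strArr)
--     runs = []
--     for n in lengths: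
--         if runs and prev == n:
--             runs[-1] += 1
--         else:
--             runs.append(1)
--         prev = n
--     return max(runs)
-- ===== Notes on version B (the rewrite author's own statement) =====
-- stated objective: alternative
-- what changed: Replaces A's hash-map length counter with sort-then-scan: sort the lengths and take the longest consecutive run, no dictionary at all.
-- outside the precondition, e.g. on solution([]): A raises ValueError, B raises ValueError
import Mathlib
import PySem

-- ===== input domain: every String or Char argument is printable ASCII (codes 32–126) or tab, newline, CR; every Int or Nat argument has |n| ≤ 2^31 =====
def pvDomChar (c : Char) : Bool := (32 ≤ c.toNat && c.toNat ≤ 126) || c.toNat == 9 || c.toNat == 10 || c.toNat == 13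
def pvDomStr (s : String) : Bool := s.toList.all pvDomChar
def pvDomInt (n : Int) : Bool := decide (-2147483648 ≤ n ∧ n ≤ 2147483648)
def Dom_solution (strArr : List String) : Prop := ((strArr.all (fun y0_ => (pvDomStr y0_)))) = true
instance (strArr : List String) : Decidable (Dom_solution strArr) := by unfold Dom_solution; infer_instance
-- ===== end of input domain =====

-- B replaces A's hash-map length counter by sort-then-scan over consecutive runs (alternative decomposition, same result).

-- ===== PORT A =====
def solution (strArr : List String) : Int :=
  let dic := strArr.foldl (fun d s =>
    if d.contains (PySem.Str.len s) then d.modify (PySem.Str.len s) 0 (· + 1)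
    else d.insert (PySem.Str.len s) 1) PySem.Dict.empty
  -- max(dic.values()) raises ValueError on an empty dict; Pre_ excludes strArr = []
  (PySem.List.max? dic.values (fun v => v)).getD 0

-- ===== PORT B =====
-- B's loop body; state = (runs in reverse order — its head is Python's runs[-1] —, prev)
def stepB : List Int × Int → Int → List Int × Int := fun st n =>
  match st.1 with
  | [] => ([1], n)
  | r :: rest => if st.2 == n then ((r + 1) :: rest, n) else (1 :: r :: rest, n)

def solution_alt (strArr : List String) : Int :=
  let lengths := PySem.List.sorted (strArr.map (fun s => PySem.Str.len s)) (fun x => x) false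
  let runs := (lengths.foldl stepB ([], 0)).1.reverse
  -- max(runs) raises ValueError when runs = [] (empty input); Pre_ excludes strArr = []
  (PySem.List.max? runs (fun v => v)).getD 0

-- ===== PRECONDITION & SPEC =====
-- Pre_ excludes only strArr = [], where both A and B raise ValueError (max() of an empty sequence).
def Pre_solution (strArr : List String) : Prop := strArr ≠ []
instance (strArr : List String) : Decidable (Pre_solution strArr) := by unfold Pre_solution; infer_instance
def pvWitness_solution : List String := (["a", "bb", "cc"])

def Spec_solution (strArr : List String) (out : Int) : Prop := out = solution_alt strArr
instance (strArr : List String) (out : Int) : Decidable (Spec_solution strArr out) := by unfold Spec_solution; infer_instance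

-- ===== CLAIM (what is proved, stated in full; the proofs are below) =====
def Claim_equal_solution : Prop := ∀ (strArr : List String), Dom_solution strArr → Pre_solution strArr → Spec_solution strArr (solution strArr)

-- ===== LEMMAS AND PROOFS =====

-- A's loop is collections.Counter over the lengths
theorem foldA_eq_counter (L : List Int) :
    L.foldl (fun d x => if d.contains x then d.modify x 0 (· + 1) else d.insert x 1)
      PySem.Dict.empty = PySem.Dict.counter L := by
  rw [← PySem.Dict.foldl_insert_getD_add_one_eq_counter]
  congr 1
  funext d x
  by_cases h : d.contains x
  · simp [h]; rfl
  · have h0 : d.getD x 0 = 0 := by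
      rw [PySem.Dict.getD_of_not_contains]; simpa using h
    simp [h, h0]

theorem values_counter (L : List Int) :
    (PySem.Dict.counter L).values = (PySem.Set.ofList L).map (fun k => (L.count k : Int)) := by
  rw [PySem.Dict.values_eq_map_keys _ (PySem.Dict.nodup_keys_counter L) 0,
      PySem.Dict.keys_counter]
  exact List.map_congr_left (fun k _ => PySem.Dict.getD_counter L k)

-- the run-lengths of a list of ints (proof-only characterisation of B's scan)
def runLens : List Int → List Int
  | [] => []
  | x :: xs => ((1 : Int) + (xs.takeWhile (· == x)).length) :: runLens (xs.dropWhile (· == x))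
  termination_by l => l.length
  decreasing_by
    have := List.length_dropWhile_le (· == x) xs
    simp; omega

theorem stepB_inv (l : List Int) : ∀ (r : Int) (rest : List Int) (p : Int),
    (l.foldl stepB (r :: rest, p)).1.reverse
      = rest.reverse ++ ((r + (l.takeWhile (· == p)).length) :: runLens (l.dropWhile (· == p))) := by
  induction l with
  | nil => intro r rest p; simp [runLens]
  | cons x xs ih =>
    intro r rest p
    by_cases h : x = p
    · subst h
      have hs : stepB (r :: rest, x) x = ((r + 1) :: rest, x) := by
        simp [stepB]
      rw [List.foldl_cons, hs, ih]
      rw [List.takeWhile_cons_of_pos (by simp), List.dropWhile_cons_of_pos (by simp)]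
      simp only [List.length_cons]
      push_cast
      ring_nf
    · have hs : stepB (r :: rest, p) x = (1 :: r :: rest, x) := by
        simp [stepB, Ne.symm h]
      rw [List.foldl_cons, hs, ih]
      rw [List.takeWhile_cons_of_neg (by simp [h]), List.dropWhile_cons_of_neg (by simp [h])]
      rw [show runLens (x :: xs) = ((1 : Int) + (xs.takeWhile (· == x)).length) :: runLens (xs.dropWhile (· == x)) from by rw [runLens]]
      simp

theorem foldB_runs (l : List Int) :
    (l.foldl stepB ([], 0)).1.reverse = runLens l := by
  cases l with
  | nil => simp [runLens]
  | cons x xs =>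
    have hs : stepB ([], 0) x = ([1], x) := by simp [stepB]
    rw [List.foldl_cons, hs, stepB_inv]
    rw [show runLens (x :: xs) = ((1 : Int) + (xs.takeWhile (· == x)).length) :: runLens (xs.dropWhile (· == x)) from by rw [runLens]]
    simp

theorem discard_of_not_mem (s : List Int) (x : Int) (h : x ∉ s) : PySem.Set.discard s x = s := by
  unfold PySem.Set.discard
  rw [List.filter_eq_self]
  intro a ha
  simp
  exact fun e => h (e ▸ ha)

theorem ofList_head_run (t d : List Int) (x : Int) (ht : ∀ y ∈ t, y = x) (hd : x ∉ d) :
    PySem.Set.ofList (x :: (t ++ d)) = x :: PySem.Set.ofList d := by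
  induction t with
  | nil =>
    rw [List.nil_append, PySem.Set.ofList_cons]
    rw [discard_of_not_mem _ _ (by simpa [PySem.Set.mem_ofList] using hd)]
  | cons a t' ih =>
    have ha : a = x := ht a (by simp)
    subst ha
    have ih' := ih (fun y hy => ht y (by simp [hy]))
    rw [List.cons_append, PySem.Set.ofList_cons, ih']
    unfold PySem.Set.discard
    rw [List.filter_cons]
    simp
    intro b hb e
    exact hd (e ▸ hb)

-- on a sorted list, run-lengths = each distinct value's multiplicity, in first-occurrence order
theorem runLens_sorted : ∀ (S : List Int), S.Pairwise (· ≤ ·) →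
    runLens S = (PySem.Set.ofList S).map (fun k => (S.count k : Int))
  | [], _ => by simp [runLens]
  | x :: xs, hp => by
    have ht : ∀ y ∈ xs.takeWhile (· == x), y = x := by
      intro y hy
      have := List.mem_takeWhile_imp hy
      simpa using this
    have hle : ∀ y ∈ xs, x ≤ y := (List.pairwise_cons.mp hp).1
    have hpd : (xs.dropWhile (· == x)).Pairwise (· ≤ ·) :=
      ((List.pairwise_cons.mp hp).2).sublist (List.dropWhile_sublist _)
    have hd : x ∉ xs.dropWhile (· == x) := by
      cases hh : xs.dropWhile (· == x) with
      | nil => simp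
      | cons h d' =>
        have hhx : h ≠ x := by
          have := List.head_dropWhile_not (· == x) (l := xs) (w := by rw [hh]; simp)
          simp [hh] at this
          exact this
        intro hmem
        rcases List.mem_cons.mp hmem with h1 | h2
        · exact hhx h1.symm
        · have hhd : h ∈ xs := (List.dropWhile_sublist _).mem (hh ▸ List.mem_cons_self)
          have h1 : x ≤ h := hle h hhd
          have h2' : h ≤ x := by
            have := (List.pairwise_cons.mp (hh ▸ hpd)).1
            exact this x h2
          exact hhx (le_antisymm h2' h1)
    have hxs : xs = xs.takeWhile (· == x) ++ xs.dropWhile (· == x) :=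
      (List.takeWhile_append_dropWhile).symm
    have hofl : PySem.Set.ofList (x :: xs) = x :: PySem.Set.ofList (xs.dropWhile (· == x)) := by
      conv_lhs => rw [hxs]
      exact ofList_head_run _ _ _ ht hd
    have hcx : (x :: xs).count x = 1 + (xs.takeWhile (· == x)).length := by
      rw [List.count_cons_self]
      conv_lhs => rw [hxs]
      rw [List.count_append]
      rw [List.count_eq_length.mpr (fun y hy => (ht y hy).symm ▸ rfl)]
      rw [List.count_eq_zero.mpr hd]
      omega
    have ih := runLens_sorted (xs.dropWhile (· == x)) hpd
    rw [runLens, hofl, List.map_cons, ih]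
    congr 1
    · rw [hcx]; push_cast; ring
    · apply List.map_congr_left
      intro k hk
      have hkd : k ∈ xs.dropWhile (· == x) := by
        simpa [PySem.Set.mem_ofList] using hk
      have hkx : k ≠ x := fun e => hd (e ▸ hkd)
      congr 1
      have hz : (List.takeWhile (· == x) xs).count k = 0 :=
        List.count_eq_zero.mpr (fun hmem => hkx (ht k hmem))
      have h1 : (x :: xs).count k = xs.count k := by
        simp [Ne.symm hkx]
      have h2 := congrArg (List.count k) hxs
      rw [List.count_append] at h2
      omega
  termination_by S => S.length
  decreasing_by
    have := List.length_dropWhile_le (· == x) xs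
    simp; omega

-- max() with no key returns the maximum VALUE, which is permutation-invariant
theorem max?_perm (l1 l2 : List Int) (h : l1.Perm l2) :
    PySem.List.max? l1 (fun v => v) = PySem.List.max? l2 (fun v => v) := by
  cases h1 : PySem.List.max? l1 (fun v => v) with
  | none =>
    have : l1 = [] := (PySem.List.max?_eq_none_iff _ _).mp h1
    subst this
    rw [List.nil_perm] at h
    subst h
    rw [(PySem.List.max?_eq_none_iff _ _).mpr rfl]
  | some m1 =>
    cases h2 : PySem.List.max? l2 (fun v => v) with
    | none =>
      have : l2 = [] := (PySem.List.max?_eq_none_iff _ _).mp h2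
      subst this
      have : l1 = [] := h.eq_nil
      subst this
      rw [(PySem.List.max?_eq_none_iff _ _).mpr rfl] at h1
      cases h1
    | some m2 =>
      have m1l2 : m1 ∈ l2 := h.mem_iff.mp (PySem.List.max?_mem h1)
      have m2l1 : m2 ∈ l1 := h.mem_iff.mpr (PySem.List.max?_mem h2)
      have a1 : m1 ≤ m2 := PySem.List.max?_isMax h2 m1 m1l2
      have a2 : m2 ≤ m1 := PySem.List.max?_isMax h1 m2 m2l1
      rw [le_antisymm a1 a2]

-- ===== VERDICT (by name: the statement is the Claim_ definition above) =====
theorem solution_spec : Claim_equal_solution := by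
  intro strArr _ hpre
  unfold Spec_solution solution solution_alt
  set L := strArr.map (fun s => PySem.Str.len s) with hL
  set S := PySem.List.sorted L (fun x => x) false with hS
  -- A's values list
  have hfold : strArr.foldl (fun d s =>
      if d.contains (PySem.Str.len s) then d.modify (PySem.Str.len s) 0 (· + 1)
      else d.insert (PySem.Str.len s) 1) PySem.Dict.empty = PySem.Dict.counter L := by
    have h := foldA_eq_counter (strArr.map (fun s => PySem.Str.len s))
    rw [List.foldl_map] at h
    exact h
  dsimp only
  rw [hfold, values_counter]
  -- B's runs list
  rw [foldB_runs, runLens_sorted S (by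
    have := PySem.List.sorted_pairwise L (fun x => x) (κ := Int)
    simpa using this)]
  -- the two lists are permutations of one another
  have hperm : S.Perm L := PySem.List.sorted_perm L (fun x => x) false
  have hkeys : (PySem.Set.ofList L).Perm (PySem.Set.ofList S) := by
    rw [List.perm_ext_iff_of_nodup (PySem.Set.nodup_ofList L) (PySem.Set.nodup_ofList S)]
    intro a
    rw [PySem.Set.mem_ofList, PySem.Set.mem_ofList]
    exact (hperm.mem_iff).symm
  have hmapeq : (PySem.Set.ofList S).map (fun k => (S.count k : Int))
      = (PySem.Set.ofList S).map (fun k => (L.count k : Int)) :=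
    List.map_congr_left (fun k _ => by rw [hperm.count_eq])
  rw [hmapeq]
  rw [max?_perm _ _ (hkeys.map _)]
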